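-- pv_equiv track=rewrite | github.com/NicolayGolovnev/LinuxKernelAnalysis | src/main/kotlin/ru/altstu/python_helper/CommitTokenizer.py | _get_message_info
-- ===== SOURCE A (Python) =====
-- def _get_message_info(message):
--     rows = message.split("\n")
--     last_row_index = len(rows) - 1
--     while last_row_index != 0:
--         first_word_in_raw = rows[last_row_index].split(" ")[0]
--         if first_word_in_raw == "" or first_word_in_raw[-1] == ':':
--             last_row_index -= 1
--         else:
--             break
--     info = "\n".join(rows[:last_row_index + 1])
--     return info
-- ===== SOURCE B (Python) =====
-- def _get_message_info(message):
--     rows = message.split("\n")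
--     last_content = 0
--     for i, row in enumerate(rows):
--         word = row.split(" ")[0]
--         if word != "" and word[-1] != ':':
--             last_content = i
--     return "\n".join(rows[:last_content + 1])
-- ===== Notes on version B (the rewrite author's own statement) =====
-- stated objective: alternative
-- what changed: Replaces A's backward early-terminating while loop over row indices with a single forward enumerate pass that remembers the highest index of a content line (non-empty first word not ending in ':'), then joins the prefix up to it.
import Mathlib
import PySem

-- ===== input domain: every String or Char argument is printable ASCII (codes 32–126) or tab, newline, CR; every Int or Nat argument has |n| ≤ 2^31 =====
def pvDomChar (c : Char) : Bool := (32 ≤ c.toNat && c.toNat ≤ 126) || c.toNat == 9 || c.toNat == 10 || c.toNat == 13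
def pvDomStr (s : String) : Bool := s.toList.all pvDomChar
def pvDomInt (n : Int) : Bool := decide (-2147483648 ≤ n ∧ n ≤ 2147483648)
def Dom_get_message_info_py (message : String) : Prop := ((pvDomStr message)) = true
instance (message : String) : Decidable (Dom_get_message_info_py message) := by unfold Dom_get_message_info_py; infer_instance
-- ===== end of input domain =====

-- B replaces A's backward early-exit scan with a forward pass remembering the last content line (alternative decomposition, same cost).

-- s.split(sep) with a nonempty literal separator: split? is none only for sep = "", so getD never fires
def pvSplit (s sep : String) : List String :=
  (PySem.Str.split? s sep).getD []

-- ===== PORT A =====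
-- rows[i].split(" ")[0]: split never returns an empty list, so index 0 is always in range
def pvFirstWord (row : String) : String :=
  (pvSplit row " ").headD ""

-- first_word == "" or first_word[-1] == ':'  (short-circuit: [-1] only read when nonempty)
def pvIsFooterA (row : String) : Bool :=
  let w := pvFirstWord row
  if w = "" then true else (PySem.Str.pyGet? w (-1) == some ':')

-- A's while loop: the index starts at len(rows)-1 and only decreases while ≠ 0, so rows[idx] is always in range
def pvLoopA (rows : List String) : Nat → Nat
  | 0 => 0
  | i + 1 => if pvIsFooterA (rows.getD (i + 1) "") then pvLoopA rows i else i + 1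

def get_message_info_py (message : String) : String :=
  let rows := pvSplit message "\n"
  let last := pvLoopA rows (rows.length - 1)
  PySem.Str.join "\n" (PySem.List.slice rows none (some ((last : Int) + 1)))

-- ===== PORT B =====
-- word != "" and word[-1] != ':'  (short-circuit as in Source B)
def pvIsContentB (row : String) : Bool :=
  let w := (pvSplit row " ").headD ""
  decide (w ≠ "" ∧ PySem.Str.pyGet? w (-1) ≠ some ':')

def get_message_info_py_alt (message : String) : String :=
  let rows := pvSplit message "\n"
  let last := (PySem.List.enumerate rows 0).foldl
      (fun acc p => if pvIsContentB p.2 then p.1 else acc) 0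
  PySem.Str.join "\n" (PySem.List.slice rows none (some (last + 1)))

-- ===== PRECONDITION & SPEC =====
def Spec_get_message_info_py (message : String) (out : String) : Prop := out = get_message_info_py_alt message
instance (message : String) (out : String) : Decidable (Spec_get_message_info_py message out) := by unfold Spec_get_message_info_py; infer_instance

-- ===== CLAIM (what is proved, stated in full; the proofs are below) =====
def Claim_equal_get_message_info_py : Prop := ∀ (message : String), Dom_get_message_info_py message → Spec_get_message_info_py message (get_message_info_py message)

-- ===== LEMMAS AND PROOFS =====

-- B's content test is the negation of A's footer test
theorem pv_content_eq_not_footer (row : String) : pvIsContentB row = !pvIsFooterA row := by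
  unfold pvIsContentB pvIsFooterA pvFirstWord
  simp [beq_eq_decide]

theorem pv_enumerate_append_singleton {α : Type} (l : List α) (x : α) (s : Int) :
    PySem.List.enumerate (l ++ [x]) s = PySem.List.enumerate l s ++ [((s + l.length : Int), x)] := by
  induction l generalizing s with
  | nil => simp [PySem.List.enumerate_cons, PySem.List.enumerate_nil]
  | cons y ys ih =>
      simp [PySem.List.enumerate_cons, ih]
      ring_nf

def pvFoldB (rows : List String) : Int :=
  (PySem.List.enumerate rows 0).foldl (fun acc p => if pvIsContentB p.2 then p.1 else acc) 0

theorem pv_foldB_append (l : List String) (x : String) :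
    pvFoldB (l ++ [x]) = if pvIsContentB x then (l.length : Int) else pvFoldB l := by
  unfold pvFoldB
  rw [pv_enumerate_append_singleton, List.foldl_append]
  simp

theorem pv_loopA_prefix (l : List String) (x : String) :
    ∀ i, i < l.length → pvLoopA (l ++ [x]) i = pvLoopA l i := by
  intro i
  induction i with
  | zero => intro _; rfl
  | succ j ih =>
      intro h
      have hj : j < l.length := Nat.lt_of_succ_lt h
      have hidx : (l ++ [x]).getD (j + 1) "" = l.getD (j + 1) "" := by
        simp [List.getD, List.getElem?_append_left h]
      simp only [pvLoopA, hidx, ih hj]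

theorem pv_main (rows : List String) :
    ((pvLoopA rows (rows.length - 1) : Int)) = pvFoldB rows := by
  induction rows using List.reverseRecOn with
  | nil => simp [pvLoopA, pvFoldB, PySem.List.enumerate_nil]
  | append_singleton l x ih =>
      rw [pv_foldB_append]
      rcases l with _ | ⟨y, ys⟩
      · simp only [List.nil_append, List.length_cons, List.length_nil]
        by_cases h : pvIsContentB x <;> simp [h, pvLoopA, pvFoldB, PySem.List.enumerate_nil]
      · have hm : ((y :: ys) ++ [x]).length - 1 = ys.length + 1 := by simp
        rw [hm]
        have hget : ((y :: ys) ++ [x]).getD (ys.length + 1) "" = x := by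
          simp [List.getD]
        simp only [pvLoopA, hget]
        rw [pv_content_eq_not_footer]
        by_cases hx : pvIsFooterA x
        · rw [pv_loopA_prefix _ _ _ (by simp)]
          simp only [hx, if_true, Bool.not_true, Bool.false_eq_true, if_false]
          simpa using ih
        · simp [hx]

-- ===== VERDICT (by name: the statement is the Claim_ definition above) =====
theorem get_message_info_py_spec : Claim_equal_get_message_info_py := by
  intro message _
  show get_message_info_py message = get_message_info_py_alt message
  simp only [get_message_info_py, get_message_info_py_alt]
  rw [pv_main]
  rfl
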